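-- pv_equiv track=rewrite | github.com/pypi-data/pypi-mirror-289 | packages/ChimeraX/ChimeraX-0.1.8-cp311-cp311-macosx_10_15_universal2.whl/chimerax/segger/segfile.py | depth_order
-- ===== SOURCE A (Python) =====
-- def depth_order(rids, id_to_child_ids, used):
--
--     idlist = []
--     for rid in rids:
--         if not rid in used:
--             used.add(rid)
--             if rid in id_to_child_ids:
--                 cids = id_to_child_ids[rid]
--                 idlist.extend(depth_order(cids, id_to_child_ids, used))
--             idlist.append(rid)
--     return idlist
-- ===== SOURCE B (Python) =====
-- def depth_order(rids, id_to_child_ids, used):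
--     ENTER, APPEND = 0, 1
--     stack = [(ENTER, rid) for rid in reversed(rids)]
--     out = []
--     while stack:
--         tag, rid = stack.pop()
--         if tag == APPEND:
--             out.append(rid)
--         elif rid not in used:
--             used.add(rid)
--             stack.append((APPEND, rid))
--             for cid in reversed(id_to_child_ids.get(rid, [])):
--                 stack.append((ENTER, cid))
--     return out
-- ===== Notes on version B (the rewrite author's own statement) =====
-- stated objective: alternative
-- what changed: Replaced the recursive post-order DFS (per-level lists extended upward) by a single iterative loop over an explicit stack of ENTER/APPEND-tagged entries appending ids to one output list.
import Mathlib
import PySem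

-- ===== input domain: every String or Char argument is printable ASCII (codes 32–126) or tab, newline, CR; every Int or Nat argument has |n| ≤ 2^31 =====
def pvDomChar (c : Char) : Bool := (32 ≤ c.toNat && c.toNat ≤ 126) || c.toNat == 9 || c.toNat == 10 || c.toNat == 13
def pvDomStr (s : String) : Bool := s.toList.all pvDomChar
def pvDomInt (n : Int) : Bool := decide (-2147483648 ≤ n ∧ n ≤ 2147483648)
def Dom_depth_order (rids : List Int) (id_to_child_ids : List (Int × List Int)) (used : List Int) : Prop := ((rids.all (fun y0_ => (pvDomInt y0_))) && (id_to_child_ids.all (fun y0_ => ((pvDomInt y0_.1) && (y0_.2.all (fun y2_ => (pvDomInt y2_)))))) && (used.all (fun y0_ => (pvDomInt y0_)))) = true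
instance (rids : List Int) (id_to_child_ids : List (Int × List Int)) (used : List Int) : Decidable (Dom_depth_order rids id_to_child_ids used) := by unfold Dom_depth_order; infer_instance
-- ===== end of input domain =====

-- B replaces A's recursive post-order DFS by one iterative loop over an explicit stack of
-- ENTER/APPEND-tagged entries; both versions mutate the caller's `used` set identically
-- (check/add at visit time), and the equivalence proved here is about the RETURN value.
-- B's port guards the while-loop with a fuel counter (proved sufficient below).

-- termination helpers (used by port A's `decreasing_by`)

theorem pvFilterLenLe {p q : Int → Bool} (h : ∀ k, p k = true → q k = true) :
    ∀ ks : List Int, (ks.filter p).length ≤ (ks.filter q).length := by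
  intro ks
  induction ks with
  | nil => simp
  | cons k t ih =>
    simp only [List.filter_cons]
    by_cases hp : p k = true
    · rw [if_pos hp, if_pos (h k hp)]
      simpa using ih
    · rw [if_neg hp]
      split
      · simp only [List.length_cons]
        omega
      · exact ih

theorem pvFilterLenLt {p q : Int → Bool} (h : ∀ k, p k = true → q k = true)
    (rid : Int) (hp : p rid = false) (hq : q rid = true) :
    ∀ ks : List Int, rid ∈ ks → (ks.filter p).length < (ks.filter q).length := by
  intro ks hmem
  induction ks with
  | nil => simp at hmem
  | cons k t ih =>
    simp only [List.filter_cons]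
    rcases List.mem_cons.mp hmem with rfl | hk
    · rw [if_neg (by simp [hp]), if_pos hq, List.length_cons]
      exact Nat.lt_succ_of_le (pvFilterLenLe h t)
    · have hlt := ih hk
      by_cases hpk : p k = true
      · rw [if_pos hpk, if_pos (h k hpk)]
        simpa using hlt
      · rw [if_neg hpk]
        split
        · simp only [List.length_cons]
          omega
        · exact hlt

-- number of dict keys not yet in `used` (termination measure component)
def pvKeysLeft (d : List (Int × List Int)) (used : List Int) : Nat :=
  ((d.map Prod.fst).filter (fun k => !(PySem.Set.contains used k))).length

theorem pvContainsSubset {u v : List Int} (hs : ∀ x, x ∈ u → x ∈ v) (k : Int)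
    (hk : PySem.Set.contains v k = false) : PySem.Set.contains u k = false := by
  cases hcu : PySem.Set.contains u k
  · rfl
  · have h2 := (PySem.Set.contains_iff v k).mpr (hs k ((PySem.Set.contains_iff u k).mp hcu))
    rw [h2] at hk
    exact Bool.noConfusion hk

theorem pvKeysLeftSubset (d : List (Int × List Int)) {u v : List Int}
    (hs : ∀ x, x ∈ u → x ∈ v) : pvKeysLeft d v ≤ pvKeysLeft d u := by
  apply pvFilterLenLe
  intro k hk
  rw [Bool.not_eq_true'] at hk ⊢
  exact pvContainsSubset hs k hk

theorem pvKeysLeft_add_le (d : List (Int × List Int)) (used : List Int) (rid : Int) :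
    pvKeysLeft d (PySem.Set.add used rid) ≤ pvKeysLeft d used :=
  pvKeysLeftSubset d (fun x hx => (PySem.Set.mem_add used rid x).mpr (Or.inl hx))

theorem pvKeysLeft_add_lt (d : List (Int × List Int)) (used : List Int) (rid : Int)
    (hmem : rid ∈ d.map Prod.fst) (hnot : ¬ PySem.Set.contains used rid = true) :
    pvKeysLeft d (PySem.Set.add used rid) < pvKeysLeft d used := by
  apply pvFilterLenLt _ rid _ _ _ hmem
  · intro k hk
    rw [Bool.not_eq_true'] at hk ⊢
    exact pvContainsSubset (fun x hx => (PySem.Set.mem_add used rid x).mpr (Or.inl hx)) k hk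
  · have h2 : rid ∈ PySem.Set.add used rid := (PySem.Set.mem_add used rid rid).mpr (Or.inr rfl)
    simp only [(PySem.Set.contains_iff _ rid).mpr h2, Bool.not_true]
  · cases hc : PySem.Set.contains used rid
    · simp
    · exact absurd hc hnot

theorem pvLookupMemKeys {d : List (Int × List Int)} {rid : Int} {v : List Int}
    (h : List.lookup rid d = some v) : rid ∈ d.map Prod.fst := by
  induction d with
  | nil => simp [List.lookup] at h
  | cons p t ih =>
    obtain ⟨a, b⟩ := p
    cases hb : rid == a
    · simp only [List.lookup, hb] at h
      exact List.mem_cons_of_mem _ (ih h)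
    · exact List.mem_cons.mpr (Or.inl (beq_iff_eq.mp hb))

-- ===== PORT A =====
-- literal port of A's recursion: returns (idlist, final used).  A terminates because `used`
-- only grows, so the subtype carries `used ⊆ result.2`, which the termination measure needs.
def depthGo (d : List (Int × List Int)) (rids : List Int) (used : List Int) :
    {r : List Int × List Int // ∀ x, x ∈ used → x ∈ r.2} :=
  match rids with
  | [] => ⟨([], used), fun _ h => h⟩
  | rid :: rest =>
    if h : PySem.Set.contains used rid then
      let r := depthGo d rest used
      ⟨r.1, r.2⟩
    else
      let used1 := PySem.Set.add used rid
      have hsub1 : ∀ x, x ∈ used → x ∈ used1 :=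
        fun x hx => (PySem.Set.mem_add used rid x).mpr (Or.inl hx)
      match hd : List.lookup rid d with
      | some cids =>
        have hmem : rid ∈ d.map Prod.fst := pvLookupMemKeys hd
        let r1 := depthGo d cids used1
        let r2 := depthGo d rest r1.1.2
        ⟨(r1.1.1 ++ [rid] ++ r2.1.1, r2.1.2),
          fun x hx => r2.2 x (r1.2 x (hsub1 x hx))⟩
      | none =>
        let r2 := depthGo d rest used1
        ⟨(rid :: r2.1.1, r2.1.2), fun x hx => r2.2 x (hsub1 x hx)⟩
  termination_by (pvKeysLeft d used, rids.length)
  decreasing_by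
  · exact Prod.Lex.right _ (Nat.lt_succ_self _)
  · exact Prod.Lex.left _ _ (pvKeysLeft_add_lt d used rid hmem h)
  · have h1 : pvKeysLeft d r1.1.2 ≤ pvKeysLeft d used1 := pvKeysLeftSubset d r1.2
    have h2 : pvKeysLeft d used1 < pvKeysLeft d used := pvKeysLeft_add_lt d used rid hmem h
    exact Prod.Lex.left _ _ (Nat.lt_of_le_of_lt h1 h2)
  · rcases Nat.lt_or_eq_of_le (pvKeysLeft_add_le d used rid) with hlt | heq
    · exact Prod.Lex.left _ _ hlt
    · rw [heq]; exact Prod.Lex.right _ (Nat.lt_succ_self _)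

def depth_order (rids : List Int) (id_to_child_ids : List (Int × List Int)) (used : List Int) : List Int :=
  (depthGo id_to_child_ids rids used).1.1

-- ===== PORT B =====
-- iterative DFS over an explicit stack of tagged entries (head of the list = top of the stack;
-- Python pushes children reversed and pops from the end, so the head-first list is the pop order);
-- tag false = ENTER, tag true = APPEND.  The `while stack:` loop is guarded by a fuel counter,
-- a plain step bound proved sufficient below (runStack_fuel / wSum_le_total): with the fuel
-- pvFuel the loop always drains the stack, so this computes exactly what Source B's loop computes.

def runStack (d : List (Int × List Int)) :
    Nat → List (Bool × Int) → List Int → List Int → List Int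
  | 0, _, out, _ => out
  | _ + 1, [], out, _ => out
  | fuel + 1, (true, rid) :: st, out, used => runStack d fuel st (out ++ [rid]) used
  | fuel + 1, (false, rid) :: st, out, used =>
      if PySem.Set.contains used rid then
        runStack d fuel st out used
      else
        runStack d fuel
          ((((List.lookup rid d).getD []).map (fun c => (false, c))) ++ (true, rid) :: st)
          out (PySem.Set.add used rid)

def pvFuel (rids : List Int) (d : List (Int × List Int)) : Nat :=
  2 * rids.length + (d.map (fun p => 2 * p.2.length + 2)).sum

def depth_order_alt (rids : List Int) (id_to_child_ids : List (Int × List Int)) (used : List Int) : List Int :=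
  runStack id_to_child_ids (pvFuel rids id_to_child_ids)
    (rids.map (fun r => (false, r))) [] used

-- ===== PRECONDITION & SPEC =====
def Spec_depth_order (rids : List Int) (id_to_child_ids : List (Int × List Int)) (used : List Int) (out : List Int) : Prop := out = depth_order_alt rids id_to_child_ids used
instance (rids : List Int) (id_to_child_ids : List (Int × List Int)) (used : List Int) (out : List Int) : Decidable (Spec_depth_order rids id_to_child_ids used out) := by unfold Spec_depth_order; infer_instance

-- ===== CLAIM (what is proved, stated in full; the proofs are below) =====
def Claim_equal_depth_order : Prop := ∀ (rids : List Int) (id_to_child_ids : List (Int × List Int)) (used : List Int), Dom_depth_order rids id_to_child_ids used → Spec_depth_order rids id_to_child_ids used (depth_order rids id_to_child_ids used)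

-- ===== LEMMAS AND PROOFS =====

-- weight of the dict entries whose key is not yet used: budget for B's future stack steps
def wSum (d : List (Int × List Int)) (used : List Int) : Nat :=
  (d.map (fun p => if p.1 ∈ used then 0 else 2 * p.2.length + 2)).sum

theorem wSum_mono {u v : List Int} (hs : ∀ x, x ∈ u → x ∈ v) :
    ∀ d, wSum d v ≤ wSum d u := by
  intro d
  induction d with
  | nil => simp [wSum]
  | cons p t ih =>
    simp only [wSum, List.map_cons, List.sum_cons] at ih ⊢
    have he : (if p.1 ∈ v then 0 else 2 * p.2.length + 2)
        ≤ (if p.1 ∈ u then 0 else 2 * p.2.length + 2) := by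
      by_cases hu : p.1 ∈ u
      · simp [hu, hs _ hu]
      · split_ifs <;> omega
    omega

theorem wSum_le_total (d : List (Int × List Int)) (used : List Int) :
    wSum d used ≤ (d.map (fun p => 2 * p.2.length + 2)).sum := by
  have h := wSum_mono (u := []) (v := used) (fun x hx => absurd hx (List.not_mem_nil)) d
  simpa [wSum] using h

theorem wSum_drop {used : List Int} {rid : Int} (hnm : rid ∉ used) :
    ∀ {d : List (Int × List Int)} {cids : List Int}, List.lookup rid d = some cids →
      wSum d (PySem.Set.add used rid) + (2 * cids.length + 2) ≤ wSum d used := by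
  intro d
  induction d with
  | nil => intro cids h; simp [List.lookup] at h
  | cons p t ih =>
    intro cids h
    obtain ⟨k, cs⟩ := p
    have hmono : wSum t (PySem.Set.add used rid) ≤ wSum t used :=
      wSum_mono (fun x hx => (PySem.Set.mem_add used rid x).mpr (Or.inl hx)) t
    cases hb : rid == k with
    | true =>
      have hk : rid = k := beq_iff_eq.mp hb
      simp only [List.lookup, hb] at h
      injection h with hcs
      subst hk
      subst hcs
      have h1 : rid ∈ PySem.Set.add used rid :=
        (PySem.Set.mem_add used rid rid).mpr (Or.inr rfl)
      simp only [wSum, List.map_cons, List.sum_cons]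
      rw [if_pos h1, if_neg hnm]
      simp only [wSum] at hmono
      omega
    | false =>
      simp only [List.lookup, hb] at h
      have hrec := ih h
      have hkne : k ≠ rid := fun e => by simp [e] at hb
      have hiff : (k ∈ PySem.Set.add used rid) ↔ (k ∈ used) := by
        rw [PySem.Set.mem_add]
        exact ⟨fun hh => hh.resolve_right hkne, Or.inl⟩
      simp only [wSum] at hrec
      simp only [wSum, List.map_cons, List.sum_cons]
      by_cases hku : k ∈ used
      · rw [if_pos hku, if_pos (hiff.mpr hku)]
        omega
      · rw [if_neg hku, if_neg (fun hh => hku (hiff.mp hh))]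
        omega

-- empty stack: the loop returns the accumulator whatever the fuel
theorem runStack_nil (d : List (Int × List Int)) (f : Nat) (out used : List Int) :
    runStack d f [] out used = out := by
  cases f <;> rfl

-- adequacy: some fuel n, bounded by 2·|rids| + wSum, drains the ENTER entries of `rids` and
-- leaves the loop continuing on `st` with A's result appended and A's final used set
theorem runStack_fuel (d : List (Int × List Int)) :
    ∀ (rids used : List Int), ∃ n : Nat,
      n + wSum d (depthGo d rids used).1.2 ≤ 2 * rids.length + wSum d used ∧
      ∀ (st : List (Bool × Int)) (out : List Int) (f : Nat),
        runStack d (n + f) (rids.map (fun r => (false, r)) ++ st) out used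
          = runStack d f st (out ++ (depthGo d rids used).1.1) (depthGo d rids used).1.2 := by
  intro rids used
  induction rids, used using depthGo.induct d with
  | case1 used =>
    exact ⟨0, by simp [depthGo], fun st out f => by simp [depthGo]⟩
  | case2 used rid rest h ih =>
    obtain ⟨n, hb, hrun⟩ := ih
    refine ⟨n + 1, ?_, ?_⟩
    · simp only [depthGo, dif_pos h] at hb ⊢
      simp only [List.length_cons]
      omega
    · intro st out f
      have hf : n + 1 + f = (n + f) + 1 := by omega
      rw [hf]
      simp only [List.map_cons, List.cons_append, runStack, if_pos h]
      rw [hrun st out f]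
      have hm : rid ∈ used := (PySem.Set.contains_iff used rid).mp h
      simp [depthGo, hm]
  | case3 used rid rest h used1 hsub1 cids hd hmem r1 r2 ih1 ih2 =>
    obtain ⟨n1, hb1, hrun1⟩ := ih1
    obtain ⟨n2, hb2x, hrun2x⟩ := ih2
    have hb2 : n2 + wSum d (depthGo d rest (depthGo d cids (PySem.Set.add used rid)).1.2).1.2
        ≤ 2 * rest.length + wSum d (depthGo d cids (PySem.Set.add used rid)).1.2 := hb2x
    have hrun2 : ∀ (st : List (Bool × Int)) (out : List Int) (f : Nat),
        runStack d (n2 + f) (rest.map (fun r => (false, r)) ++ st) out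
            (depthGo d cids (PySem.Set.add used rid)).1.2
          = runStack d f st (out ++ (depthGo d rest (depthGo d cids (PySem.Set.add used rid)).1.2).1.1)
              (depthGo d rest (depthGo d cids (PySem.Set.add used rid)).1.2).1.2 := hrun2x
    have hnm : rid ∉ used := fun hm => h ((PySem.Set.contains_iff used rid).mpr hm)
    have hdrop := wSum_drop hnm hd
    refine ⟨n1 + n2 + 2, ?_, ?_⟩
    · have hgo : (depthGo d (rid :: rest) used).1.2
          = (depthGo d rest (depthGo d cids (PySem.Set.add used rid)).1.2).1.2 := by
        simp only [depthGo, dif_neg h]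
        split
        · rename_i cids2 hd2
          rw [hd] at hd2; injection hd2 with e; subst e; rfl
        · rename_i hd2; rw [hd] at hd2; cases hd2
      rw [hgo]
      simp only [List.length_cons]
      omega
    · intro st out f
      have hf : n1 + n2 + 2 + f = (n1 + (n2 + 1 + f)) + 1 := by omega
      rw [hf]
      simp only [List.map_cons, List.cons_append, runStack, if_neg h, hd, Option.getD_some]
      rw [hrun1 ((true, rid) :: (rest.map (fun r => (false, r)) ++ st)) out (n2 + 1 + f)]
      have hf2 : n2 + 1 + f = (n2 + f) + 1 := by omega
      rw [hf2]
      simp only [runStack]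
      rw [hrun2 st (out ++ (depthGo d cids (PySem.Set.add used rid)).1.1 ++ [rid]) f]
      simp only [depthGo, dif_neg h]
      split
      · rename_i cids2 hd2
        rw [hd] at hd2; injection hd2 with e; subst e
        simp [List.append_assoc]
      · rename_i hd2; rw [hd] at hd2; cases hd2
  | case4 used rid rest h used1 hsub1 hd r2 ih =>
    obtain ⟨n, hb, hrun⟩ := ih
    have hmono : wSum d (PySem.Set.add used rid) ≤ wSum d used :=
      wSum_mono (fun x hx => (PySem.Set.mem_add used rid x).mpr (Or.inl hx)) d
    refine ⟨n + 2, ?_, ?_⟩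
    · have hgo : (depthGo d (rid :: rest) used).1.2
          = (depthGo d rest (PySem.Set.add used rid)).1.2 := by
        simp only [depthGo, dif_neg h]
        split
        · rename_i cids2 hd2; rw [hd] at hd2; cases hd2
        · rfl
      rw [hgo]
      simp only [List.length_cons]
      omega
    · intro st out f
      have hf : n + 2 + f = ((n + f) + 1) + 1 := by omega
      rw [hf]
      simp only [List.map_cons, List.cons_append, runStack, if_neg h, hd, Option.getD_none,
        List.map_nil, List.nil_append]
      rw [hrun st (out ++ [rid]) f]
      simp only [depthGo, dif_neg h]
      split
      · rename_i cids2 hd2; rw [hd] at hd2; cases hd2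
      · simp [List.append_assoc]

-- ===== VERDICT (by name: the statement is the Claim_ definition above) =====
theorem depth_order_spec : Claim_equal_depth_order := by
  intro rids d used _
  unfold Spec_depth_order depth_order depth_order_alt
  obtain ⟨n, hb, hrun⟩ := runStack_fuel d rids used
  have hle : n ≤ pvFuel rids d := by
    have ht := wSum_le_total d used
    unfold pvFuel
    omega
  have hf : pvFuel rids d = n + (pvFuel rids d - n) := by omega
  rw [hf, show rids.map (fun r => (false, r)) = rids.map (fun r => (false, r)) ++ [] by simp]
  rw [hrun [] [] (pvFuel rids d - n)]
  rw [runStack_nil]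
  simp
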